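-- pv_equiv track=rewrite | github.com/Zampfi/public-workflow-sdk | zamp_public_workflow_sdk/simulation/strategies/temporal_history_strategy.py | _collect_nodes_per_workflow
-- ===== SOURCE A (Python) =====
-- def _collect_nodes_per_workflow(node_ids: list[str]) -> dict[str, list[str]]:
--     """
--     Collect all node_ids needed from each workflow for batching (with workflow prefix).
--
--     Input: ["Parent#1.query#1", "Parent#1.Child#1.activity#1"]
--     Output: {"Parent#1": ["Parent#1.query#1", "Parent#1.Child#1"],
--              "Parent#1.Child#1": ["Parent#1.Child#1.activity#1"]}
--     """
--     workflow_nodes = {}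
--
--     for node_id in node_ids:
--         parts = node_id.split(".")
--
--         # For each level, collect what that workflow needs (with prefix)
--         for i in range(1, len(parts)):
--             workflow_path = ".".join(parts[:i])
--             node_with_prefix = ".".join(parts[: i + 1])
--
--             if workflow_path not in workflow_nodes:
--                 workflow_nodes[workflow_path] = []
--
--             if node_with_prefix not in workflow_nodes[workflow_path]:
--                 workflow_nodes[workflow_path].append(node_with_prefix)
--
--     return workflow_nodes
-- ===== SOURCE B (Python) =====
-- def _collect_nodes_per_workflow(node_ids: list[str]) -> dict[str, list[str]]:
--     # Phase 1: stream every (workflow, child) pair, growing each prefix string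
--     # incrementally instead of re-joining parts[:i] slices at every level.
--     pairs = []
--     for node_id in node_ids:
--         parts = node_id.split(".")
--         acc = parts[0]
--         for part in parts[1:]:
--             nxt = acc + "." + part
--             pairs.append((acc, nxt))
--             acc = nxt
--     # Phase 2: one global order-preserving dedup of the pair stream;
--     # Phase 3: group the surviving children under their workflow.
--     grouped = {}
--     for wp, child in dict.fromkeys(pairs):
--         grouped.setdefault(wp, []).append(child)
--     return grouped
-- ===== Notes on version B (the rewrite author's own statement) =====
-- stated objective: alternative
-- what changed: Instead of A's per-level slice-and-join with an inline dict membership/initialisation branch, B streams every (workflow, child) pair while growing each prefix string incrementally (acc + '.' + part), then performs one global order-preserving dedup of the whole pair stream (dict.fromkeys) and a final group-by pass building the result dict.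
import Mathlib
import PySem

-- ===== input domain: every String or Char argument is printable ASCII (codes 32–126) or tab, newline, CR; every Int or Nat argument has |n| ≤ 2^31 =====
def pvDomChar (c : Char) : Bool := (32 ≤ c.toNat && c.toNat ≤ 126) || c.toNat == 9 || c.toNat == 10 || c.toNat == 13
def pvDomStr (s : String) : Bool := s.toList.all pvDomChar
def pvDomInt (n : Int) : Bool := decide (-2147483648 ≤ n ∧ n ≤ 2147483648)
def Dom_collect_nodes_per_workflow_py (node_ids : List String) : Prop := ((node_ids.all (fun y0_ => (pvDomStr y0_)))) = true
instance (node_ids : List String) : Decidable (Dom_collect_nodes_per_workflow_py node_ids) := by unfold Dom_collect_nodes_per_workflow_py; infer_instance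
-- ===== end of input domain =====

-- B streams every (workflow, child) pair growing each prefix string incrementally
-- (no parts[:i] slice-and-join and no membership test in the loop), then does one
-- global order-preserving dedup of the pair stream and groups children per workflow.


-- ===== PORT A =====
-- one iteration of A's inner 'for i in range(1, len(parts))' body
def pvInnerA (parts : List String) (d : PySem.Dict String (List String)) (i : Int) :
    PySem.Dict String (List String) :=
  let workflow_path := PySem.Str.join "." (PySem.List.slice parts none (some i))
  let node_with_prefix := PySem.Str.join "." (PySem.List.slice parts none (some (i + 1)))
  let d1 := if d.contains workflow_path then d else d.insert workflow_path []
  if node_with_prefix ∈ d1.getD workflow_path [] then d1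
  else d1.insert workflow_path (d1.getD workflow_path [] ++ [node_with_prefix])

-- one iteration of A's outer 'for node_id in node_ids' body
def pvNodeA (d : PySem.Dict String (List String)) (node_id : String) :
    PySem.Dict String (List String) :=
  let parts := (PySem.Str.split? node_id ".").getD []
  (PySem.List.pyRange 1 (parts.length : Int) 1).foldl (pvInnerA parts) d

def collect_nodes_per_workflow_py (node_ids : List String) : List (String × List String) :=
  (node_ids.foldl pvNodeA PySem.Dict.empty).items

-- ===== PORT B =====
-- B's inner loop: 'for part in parts[1:]: nxt = acc + "." + part; pairs.append((acc, nxt)); acc = nxt'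
def pvGoB : String → List String → List (String × String)
  | _, [] => []
  | acc, part :: rest =>
      let nxt := acc ++ "." ++ part
      (acc, nxt) :: pvGoB nxt rest

-- the pairs B's phase 1 emits for one node_id (parts is never [] since split? never is)
def pvPairsOfNode (node_id : String) : List (String × String) :=
  match (PySem.Str.split? node_id ".").getD [] with
  | [] => []
  | p0 :: rest => pvGoB p0 rest

-- B's phase-3 loop body: grouped.setdefault(wp, []).append(child)
def pvGroupStep (d : PySem.Dict String (List String)) (p : String × String) :
    PySem.Dict String (List String) :=
  d.modify p.1 [] (· ++ [p.2])

def collect_nodes_per_workflow_py_alt (node_ids : List String) : List (String × List String) :=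
  let pairs := node_ids.foldl (fun acc nid => acc ++ pvPairsOfNode nid) []
  ((PySem.List.dedup pairs).foldl pvGroupStep PySem.Dict.empty).items

-- ===== PRECONDITION & SPEC =====
def Spec_collect_nodes_per_workflow_py (node_ids : List String) (out : List (String × List String)) : Prop := out = collect_nodes_per_workflow_py_alt node_ids
instance (node_ids : List String) (out : List (String × List String)) : Decidable (Spec_collect_nodes_per_workflow_py node_ids out) := by unfold Spec_collect_nodes_per_workflow_py; infer_instance

-- ===== CLAIM (what is proved, stated in full; the proofs are below) =====
def Claim_equal_collect_nodes_per_workflow_py : Prop := ∀ (node_ids : List String), Dom_collect_nodes_per_workflow_py node_ids → Spec_collect_nodes_per_workflow_py node_ids (collect_nodes_per_workflow_py node_ids)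

-- ===== LEMMAS AND PROOFS =====

-- A's per-pair update, abstracted over the (workflow_path, node_with_prefix) pair
def pvStepA (d : PySem.Dict String (List String)) (p : String × String) :
    PySem.Dict String (List String) :=
  let d1 := if d.contains p.1 then d else d.insert p.1 []
  if p.2 ∈ d1.getD p.1 [] then d1
  else d1.insert p.1 (d1.getD p.1 [] ++ [p.2])

theorem pv_innerA_eq_stepA (parts : List String) (d : PySem.Dict String (List String)) (i : Int) :
    pvInnerA parts d i =
      pvStepA d (PySem.Str.join "." (PySem.List.slice parts none (some i)),
                 PySem.Str.join "." (PySem.List.slice parts none (some (i + 1)))) := rfl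

theorem pv_chars_join_append (sep x : List Char) (l : List (List Char)) (h : l ≠ []) :
    PySem.Chars.join sep (l ++ [x]) = PySem.Chars.join sep l ++ sep ++ x := by
  induction l with
  | nil => exact absurd rfl h
  | cons a l ih =>
    cases l with
    | nil =>
        simp [PySem.Chars.join_cons_cons, PySem.Chars.join_singleton]
    | cons b l' =>
        simp only [List.cons_append] at ih ⊢
        rw [PySem.Chars.join_cons_cons, ih (by simp), PySem.Chars.join_cons_cons]
        simp [List.append_assoc]

theorem pv_join_append (pref : List String) (r : String) (h : pref ≠ []) :
    PySem.Str.join "." (pref ++ [r]) = PySem.Str.join "." pref ++ "." ++ r := by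
  rw [← String.toList_inj]
  simp only [PySem.Str.toList_join, List.map_append, List.map_cons, List.map_nil]
  rw [pv_chars_join_append _ _ _ (by simpa using h)]
  simp

theorem pv_join_singleton (r : String) : PySem.Str.join "." [r] = r := by
  rw [← String.toList_inj]
  simp [PySem.Str.toList_join, PySem.Chars.join_singleton]

-- A's inner loop over range(k, k+|rest|) equals folding pvStepA over B's incremental pairs
theorem pv_inner_fold (rest : List String) :
    ∀ (pref : List String) (d : PySem.Dict String (List String)), pref ≠ [] →
    (PySem.List.pyRange (pref.length : Int) ((pref.length + rest.length : Nat) : Int) 1).foldl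
        (pvInnerA (pref ++ rest)) d
      = (pvGoB (PySem.Str.join "." pref) rest).foldl pvStepA d := by
  induction rest with
  | nil =>
      intro pref d _
      simp [PySem.List.pyRange, pvGoB]
  | cons r rest' ih =>
      intro pref d hp
      have hlt : (pref.length : Int) < ((pref.length + (r :: rest').length : Nat) : Int) := by
        have hn : pref.length < pref.length + (r :: rest').length := by
          simp only [List.length_cons]; omega
        exact_mod_cast hn
      rw [PySem.List.pyRange_one_cons hlt, List.foldl_cons]
      have hsl1 : PySem.List.slice (pref ++ r :: rest') none (some (pref.length : Int))
          = pref := by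
        rw [PySem.List.slice_to _ (by positivity)]
        simp
      have hsl2 : PySem.List.slice (pref ++ r :: rest') none (some ((pref.length : Int) + 1))
          = pref ++ [r] := by
        have : (pref.length : Int) + 1 = ((pref.length + 1 : Nat) : Int) := by push_cast; ring
        rw [this, PySem.List.slice_to _ (by positivity)]
        rw [Int.toNat_natCast, List.take_append]
        simp
      rw [pv_innerA_eq_stepA, hsl1, hsl2, pv_join_append pref r hp]
      have hne : pref ++ [r] ≠ [] := by simp
      have := ih (pref ++ [r]) (pvStepA d (PySem.Str.join "." pref,
        PySem.Str.join "." pref ++ "." ++ r)) hne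
      rw [pv_join_append pref r hp] at this
      simp only [List.append_assoc, List.cons_append, List.nil_append,
        List.length_append, List.length_cons, List.length_nil] at this ⊢
      push_cast at this ⊢
      ring_nf at this ⊢
      exact this

-- one node of A equals folding pvStepA over B's pairs for that node
theorem pv_nodeA_eq (d : PySem.Dict String (List String)) (nid : String) :
    pvNodeA d nid = (pvPairsOfNode nid).foldl pvStepA d := by
  unfold pvNodeA pvPairsOfNode
  cases hp : (PySem.Str.split? nid ".").getD [] with
  | nil => simp [PySem.List.pyRange]
  | cons p0 rest =>
      have := pv_inner_fold rest [p0] d (by simp)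
      rw [pv_join_singleton,
        show ((([p0] : List String).length + rest.length : Nat) : Int)
          = (((p0 :: rest : List String).length : Nat) : Int) by
            simp only [List.length_cons, List.length_nil]; omega] at this
      simpa using this
-- A's whole double loop equals folding pvStepA over the flattened pair stream
theorem pv_outer_fold (node_ids : List String) (d : PySem.Dict String (List String)) :
    node_ids.foldl pvNodeA d = (node_ids.flatMap pvPairsOfNode).foldl pvStepA d := by
  induction node_ids generalizing d with
  | nil => rfl
  | cons nid rest ih =>
      rw [List.foldl_cons, List.flatMap_cons, List.foldl_append, pv_nodeA_eq, ih]

theorem pv_getD_group (Q : List (String × String)) (k : String) :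
    (Q.foldl pvGroupStep PySem.Dict.empty).getD k []
      = (Q.filter (fun p => p.1 == k)).map (·.2) := by
  have : pvGroupStep = fun (d : PySem.Dict String (List String)) p => d.modify p.1 [] (· ++ [p.2]) := rfl
  rw [this, PySem.Dict.getD_foldl_modify_append]
  simp [PySem.Dict.getD_empty]

theorem pv_mem_getD_group (Q : List (String × String)) (k x : String) :
    x ∈ (Q.foldl pvGroupStep PySem.Dict.empty).getD k [] ↔ (k, x) ∈ Q := by
  rw [pv_getD_group]
  constructor
  · rintro hx
    simp only [List.mem_map, List.mem_filter] at hx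
    obtain ⟨⟨a, b⟩, ⟨hmem, hk⟩, hb⟩ := hx
    simp at hk hb
    subst hk; subst hb; exact hmem
  · intro hmem
    simp only [List.mem_map, List.mem_filter]
    exact ⟨(k, x), ⟨hmem, by simp⟩, rfl⟩

-- the heart: A's dedup-inline fold over any pair stream = dedup first, then group
theorem pv_stepA_eq_group (P : List (String × String)) :
    P.foldl pvStepA PySem.Dict.empty
      = (PySem.List.dedup P).foldl pvGroupStep PySem.Dict.empty := by
  induction P using List.reverseRecOn with
  | nil => rfl
  | append_singleton P p ih =>
      obtain ⟨k, x⟩ := p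
      rw [List.foldl_append, List.foldl_cons, List.foldl_nil, ih]
      have hded : PySem.List.dedup (P ++ [(k, x)])
          = if (k, x) ∈ P then PySem.List.dedup P else PySem.List.dedup P ++ [(k, x)] := by
        simp only [PySem.List.dedup_eq_ofList, PySem.Set.ofList_eq_foldl, List.foldl_append,
          List.foldl_cons, List.foldl_nil]
        rw [← PySem.Set.ofList_eq_foldl]
        show PySem.Set.add _ _ = _
        unfold PySem.Set.add
        by_cases hm : (k, x) ∈ P
        · rw [if_pos, if_pos hm]
          simp [PySem.Set.contains, PySem.Set.mem_ofList, hm]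
        · rw [if_neg, if_neg hm]
          simp [PySem.Set.contains, PySem.Set.mem_ofList, hm]
      set D := (PySem.List.dedup P).foldl pvGroupStep PySem.Dict.empty with hD
      by_cases hm : (k, x) ∈ P
      · rw [hded, if_pos hm]
        have hx : x ∈ D.getD k [] := by
          rw [hD, pv_mem_getD_group]
          rw [PySem.List.mem_dedup]; exact hm
        have hc : D.contains k = true := by
          by_contra hc
          rw [PySem.Dict.getD_of_not_contains D [] (by simpa using hc)] at hx
          simp at hx
        show pvStepA D (k, x) = D
        unfold pvStepA
        simp only [hc, if_pos, hx]
      · rw [hded, if_neg hm, List.foldl_append, List.foldl_cons, List.foldl_nil, ← hD]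
        have hx : x ∉ D.getD k [] := by
          rw [hD, pv_mem_getD_group, PySem.List.mem_dedup]; exact hm
        show pvStepA D (k, x) = pvGroupStep D (k, x)
        unfold pvStepA pvGroupStep
        show _ = D.insert k (D.getD k [] ++ [x])
        by_cases hc : D.contains k = true
        · simp only [hc, if_true, hx, if_false]
        · have hc' : D.contains k = false := by simpa using hc
          have hg : D.getD k [] = [] := PySem.Dict.getD_of_not_contains D [] hc'
          simp only [hc', Bool.false_eq_true, if_false]
          rw [PySem.Dict.getD_insert_self]
          simp only [List.not_mem_nil, if_false, List.nil_append]
          rw [PySem.Dict.insert_insert_self, hg]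
          rfl

-- ===== VERDICT (by name: the statement is the Claim_ definition above) =====
theorem collect_nodes_per_workflow_py_spec : Claim_equal_collect_nodes_per_workflow_py := by
  intro node_ids _
  unfold Spec_collect_nodes_per_workflow_py collect_nodes_per_workflow_py
    collect_nodes_per_workflow_py_alt
  rw [pv_outer_fold, pv_stepA_eq_group,
    PySem.List.foldl_append_eq_flatMap pvPairsOfNode node_ids []]
  rfl
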